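-- pv_equiv track=rewrite | github.com/fadkeabhi/GFG-POTD | 2023/MAR/22.py | solve
-- ===== SOURCE A (Python) =====
-- def solve (X, Y, S):
--     if X>=Y: order = [('pr', X), ('rp', Y)]
--     else: order = [('rp', Y), ('pr', X)]
--     ans = 0
--     for (c0, c1), score in order:
--         N, NS = len(S), []
--         for i in range(N):
--             NS.append(S[i])
--             if S[i] == c1 and len(NS)>1 and NS[-2]==c0:
--                 ans += score
--                 NS.pop(); NS.pop()
--         S = NS
--     return ans
-- ===== SOURCE B (Python) =====
-- def solve(X, Y, S):
--     # One pass with two counters instead of A's two stack passes: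
--     # within each run of 'p'/'r' chars, high pairs are matched greedily and the
--     # leftover is s^a f^b, which yields min(a, b) low pairs.
--     if X >= Y:
--         f, s, hi, lo = 'p', 'r', X, Y
--     else:
--         f, s, hi, lo = 'r', 'p', Y, X
--     ans = 0
--     a = b = 0  # a: unmatched second chars, b: pending first chars in current run
--     for ch in S:
--         if ch == f:
--             b += 1
--         elif ch == s:
--             if b > 0:
--                 ans += hi
--                 b -= 1
--             else:
--                 a += 1
--         else:
--             ans += lo * min(a, b)
--             a = b = 0
--     return ans + lo * min(a, b)
-- ===== Notes on version B (the rewrite author's own statement) =====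
-- stated objective: alternative
-- what changed: Replaces A's two stack-building passes over the string (build NS, pop pairs, rescan the residual) by a single scan with two counters per run of 'p'/'r' characters, adding hi per matched high pair and lo*min(a,b) per run for the low pattern; trades A's explicit stacks for O(1) counter state.
import Mathlib
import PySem

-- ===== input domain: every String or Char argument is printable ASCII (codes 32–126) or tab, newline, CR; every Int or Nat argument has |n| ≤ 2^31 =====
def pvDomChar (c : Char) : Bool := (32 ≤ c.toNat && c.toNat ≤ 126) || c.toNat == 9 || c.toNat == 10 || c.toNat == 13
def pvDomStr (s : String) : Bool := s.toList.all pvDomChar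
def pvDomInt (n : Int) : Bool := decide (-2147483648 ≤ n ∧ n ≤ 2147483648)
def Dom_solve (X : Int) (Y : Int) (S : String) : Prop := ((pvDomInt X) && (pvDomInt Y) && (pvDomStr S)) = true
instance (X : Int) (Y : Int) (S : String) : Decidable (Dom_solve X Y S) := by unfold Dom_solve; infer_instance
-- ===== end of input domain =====

-- B replaces A's two stack passes by a single scan keeping two counters per run of 'p'/'r' chars (simpler state, one pass).

-- ===== PORT A =====
-- The Python stack NS is kept top-first (Lean's natural list-stack); passA
-- returns it re-reversed so the next pass reads it in Python's left-to-right order.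
def stepA (c0 c1 : Char) (score : Int) (st : List Char × Int) (c : Char) : List Char × Int :=
  if c = c1 then
    match st.1 with
    | d :: rest => if d = c0 then (rest, st.2 + score) else (c :: st.1, st.2)
    | [] => (c :: st.1, st.2)
  else (c :: st.1, st.2)

def passA (c0 c1 : Char) (score : Int) (S : List Char) (ans : Int) : List Char × Int :=
  let r := S.foldl (stepA c0 c1 score) ([], ans)
  (r.1.reverse, r.2)

def solve (X : Int) (Y : Int) (S : String) : Int :=
  let order := if X ≥ Y then [(('p', 'r'), X), (('r', 'p'), Y)]
               else [(('r', 'p'), Y), (('p', 'r'), X)]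
  (order.foldl (fun (st : List Char × Int) p => passA p.1.1 p.1.2 p.2 st.1 st.2) (S.toList, 0)).2

-- ===== PORT B =====
def stepB (f s : Char) (hi lo : Int) (st : Int × Int × Int) (c : Char) : Int × Int × Int :=
  if c = f then (st.1, st.2.1, st.2.2 + 1)
  else if c = s then
    (if st.2.2 > 0 then (st.1 + hi, st.2.1, st.2.2 - 1) else (st.1, st.2.1 + 1, st.2.2))
  else (st.1 + lo * min st.2.1 st.2.2, 0, 0)

def solve_alt (X : Int) (Y : Int) (S : String) : Int :=
  let p := if X ≥ Y then ('p', 'r', X, Y) else ('r', 'p', Y, X)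
  let r := S.toList.foldl (stepB p.1 p.2.1 p.2.2.1 p.2.2.2) (0, 0, 0)
  r.1 + p.2.2.2 * min r.2.1 r.2.2

-- ===== PRECONDITION & SPEC =====
def Spec_solve (X : Int) (Y : Int) (S : String) (out : Int) : Prop := out = solve_alt X Y S
instance (X : Int) (Y : Int) (S : String) (out : Int) : Decidable (Spec_solve X Y S out) := by unfold Spec_solve; infer_instance

-- ===== CLAIM (what is proved, stated in full; the proofs are below) =====
def Claim_equal_solve : Prop := ∀ (X : Int) (Y : Int) (S : String), Dom_solve X Y S → Spec_solve X Y S (solve X Y S)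

-- ===== LEMMAS AND PROOFS =====

-- a list that is empty or starts with a char different from both f and s
def Blockish (f s : Char) (R : List Char) : Prop :=
  R = [] ∨ ∃ c R', R = c :: R' ∧ c ≠ f ∧ c ≠ s

theorem stepA_shift (c0 c1 : Char) (sc : Int) (W : List Char) :
    ∀ (stk : List Char) (a d : Int),
      W.foldl (stepA c0 c1 sc) (stk, a + d)
        = ((W.foldl (stepA c0 c1 sc) (stk, a)).1, (W.foldl (stepA c0 c1 sc) (stk, a)).2 + d) := by
  induction W with
  | nil => intro stk a d; simp
  | cons c W ih =>
    intro stk a d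
    simp only [List.foldl_cons]
    have h : stepA c0 c1 sc (stk, a + d) c
        = ((stepA c0 c1 sc (stk, a) c).1, (stepA c0 c1 sc (stk, a) c).2 + d) := by
      cases stk <;> simp only [stepA] <;> split_ifs <;> (simp; try ring)
    rw [h]
    rcases hst : stepA c0 c1 sc (stk, a) c with ⟨stk', a'⟩
    simpa using ih stk' a' d

theorem foldl_push_s (s f : Char) (hsf : s ≠ f) (lo : Int) :
    ∀ (n : Nat) (t : List Char) (q : Int),
      (List.replicate n s).foldl (stepA s f lo) (t, q) = (List.replicate n s ++ t, q) := by
  intro n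
  induction n with
  | zero => simp
  | succ n ih =>
    intro t q
    rw [List.replicate_succ, List.foldl_cons]
    have h : stepA s f lo (t, q) s = (s :: t, q) := by
      unfold stepA; simp [hsf]
    rw [h, ih, ← List.replicate_succ, List.replicate_succ']
    simp

theorem foldl_pop_f (s f : Char) (hsf : s ≠ f) (lo : Int) :
    ∀ (b a : Nat) (t : List Char) (q : Int), t.head? ≠ some s →
      (List.replicate b f).foldl (stepA s f lo) (List.replicate a s ++ t, q)
        = (List.replicate (a - b) s ++ List.replicate (b - a) f ++ t, q + lo * ((min a b : Nat) : Int)) := by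
  intro b
  induction b with
  | zero => intro a t q ht; simp
  | succ b ih =>
    intro a t q ht
    rw [List.replicate_succ, List.foldl_cons]
    cases a with
    | zero =>
      have h : stepA s f lo (t, q) f = (f :: t, q) := by
        unfold stepA
        cases t with
        | nil => simp
        | cons d t' =>
          have hd : d ≠ s := by intro h'; exact ht (by simp [h'])
          simp [hd]
      rw [List.replicate_zero, List.nil_append] at *
      rw [h]
      have := ih 0 (f :: t) q (by simp [Ne.symm hsf])
      simp only [List.replicate_zero, List.nil_append] at this
      rw [this]
      simp [List.replicate_succ']
    | succ a =>
      have h : stepA s f lo (List.replicate (a + 1) s ++ t, q) f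
          = (List.replicate a s ++ t, q + lo) := by
        unfold stepA; simp [List.replicate_succ]
      rw [h, ih a t (q + lo) ht]
      have hmin : (min (a + 1) (b + 1)) = min a b + 1 := by omega
      have hsa : a + 1 - (b + 1) = a - b := by omega
      have hsb : b + 1 - (a + 1) = b - a := by omega
      rw [hmin, hsa, hsb]
      push_cast
      ring_nf

theorem main_inv (f s : Char) (hfs : f ≠ s) (hi lo : Int) (L : List Char) :
    ∃ (a b : Nat) (R t : List Char) (ans1 q : Int),
      L.foldl (stepA f s hi) ([], 0) = (List.replicate b f ++ List.replicate a s ++ R, ans1) ∧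
      Blockish f s R ∧
      R.reverse.foldl (stepA s f lo) ([], 0) = (t, q) ∧
      Blockish f s t ∧
      L.foldl (stepB f s hi lo) (0, 0, 0) = (ans1 + q, (a : Int), (b : Int)) := by
  induction L using List.reverseRecOn with
  | nil =>
    exact ⟨0, 0, [], [], 0, 0, by simp, Or.inl rfl, by simp, Or.inl rfl, by simp⟩
  | append_singleton L c ih =>
    obtain ⟨a, b, R, t, ans1, q, hA, hR, hT, ht, hB⟩ := ih
    rw [List.foldl_append, List.foldl_append, hA, hB, List.foldl_cons, List.foldl_cons,
        List.foldl_nil, List.foldl_nil]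
    by_cases hcf : c = f
    · subst hcf
      refine ⟨a, b + 1, R, t, ans1, q, ?_, hR, hT, ht, ?_⟩
      · unfold stepA; simp [hfs, List.replicate_succ]
      · unfold stepB; simp
    · by_cases hcs : c = s
      · subst hcs
        cases b with
        | succ b' =>
          refine ⟨a, b', R, t, ans1 + hi, q, ?_, hR, hT, ht, ?_⟩
          · unfold stepA; simp [List.replicate_succ]
          · unfold stepB
            have h1 : ((b' : Int) + 1 > 0) := by positivity
            simp [Ne.symm hfs, h1]
            omega
        | zero =>
          refine ⟨a + 1, 0, R, t, ans1, q, ?_, hR, hT, ht, ?_⟩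
          · unfold stepA
            simp only [List.replicate_zero, List.nil_append]
            cases a with
            | zero =>
              rcases hR with h0 | ⟨c', R', hRe, hc'f, hc's⟩
              · subst h0; simp [List.replicate_succ]
              · subst hRe; simp [hc'f, List.replicate_succ]
            | succ a' =>
              simp [List.replicate_succ, Ne.symm hfs]
          · unfold stepB
            simp [Ne.symm hfs]
      · -- blocker char
        refine ⟨0, 0, c :: (List.replicate b f ++ List.replicate a s ++ R),
                c :: (List.replicate (a - b) s ++ List.replicate (b - a) f ++ t), ans1,
                q + lo * ((min a b : Nat) : Int), ?_, ?_, ?_, ?_, ?_⟩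
        · unfold stepA; simp [hcs]
        · exact Or.inr ⟨c, _, rfl, hcf, hcs⟩
        · have htne : t.head? ≠ some s := by
            rcases ht with h0 | ⟨c', t', hte, hc'f, hc's⟩
            · subst h0; simp
            · subst hte; simp [hc's]
          rw [List.reverse_cons, List.append_assoc, List.append_assoc, List.reverse_append,
              List.reverse_append, List.reverse_replicate, List.reverse_replicate]
          rw [List.foldl_append, List.foldl_append, List.foldl_append, hT,
              foldl_push_s s f (Ne.symm hfs) lo a t q,
              foldl_pop_f s f (Ne.symm hfs) lo b a t q htne]
          rw [List.foldl_cons, List.foldl_nil]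
          unfold stepA
          simp [hcf]
        · exact Or.inr ⟨c, _, rfl, hcf, hcs⟩
        · unfold stepB
          simp [hcf, hcs]
          rw [Int.min_def]
          have : min (a : Int) (b : Int) = ((min a b : Nat) : Int) := by
            rw [Nat.cast_min]
          rw [← Int.min_def, this]
          ring

theorem solve_eq_of_inv (f s : Char) (hfs : f ≠ s) (hi lo : Int) (L : List Char) :
    ((([(( f, s), hi), ((s, f), lo)] : List ((Char × Char) × Int)).foldl
        (fun (st : List Char × Int) p => passA p.1.1 p.1.2 p.2 st.1 st.2) (L, 0)).2)
      = (let r := L.foldl (stepB f s hi lo) (0, 0, 0); r.1 + lo * min r.2.1 r.2.2) := by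
  obtain ⟨a, b, R, t, ans1, q, hA, hR, hT, ht, hB⟩ := main_inv f s hfs hi lo L
  simp only [List.foldl_cons, List.foldl_nil]
  unfold passA
  simp only [hA]
  have htne : t.head? ≠ some s := by
    rcases ht with h0 | ⟨c', t', hte, hc'f, hc's⟩
    · subst h0; simp
    · subst hte; simp [hc's]
  have hrev : (List.replicate b f ++ List.replicate a s ++ R).reverse
      = R.reverse ++ (List.replicate a s ++ List.replicate b f) := by
    simp [List.reverse_append, List.reverse_replicate]
  have hshift := stepA_shift s f lo (List.replicate b f ++ List.replicate a s ++ R).reverse [] 0 ans1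
  rw [zero_add] at hshift
  have hval : ((List.replicate b f ++ List.replicate a s ++ R).reverse.foldl
      (stepA s f lo) ([], 0)).2 = q + lo * ((min a b : Nat) : Int) := by
    rw [hrev, List.foldl_append, List.foldl_append, hT,
        foldl_push_s s f (Ne.symm hfs) lo a t q,
        foldl_pop_f s f (Ne.symm hfs) lo b a t q htne]
  simp only [hshift, hval, hB]
  have : min (a : Int) (b : Int) = ((min a b : Nat) : Int) := by rw [Nat.cast_min]
  simp only [this]
  ring

-- ===== VERDICT (by name: the statement is the Claim_ definition above) =====
theorem solve_spec : Claim_equal_solve := by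
  intro X Y S _
  unfold Spec_solve solve solve_alt
  by_cases h : X ≥ Y
  · simp only [if_pos h]
    exact solve_eq_of_inv 'p' 'r' (by decide) X Y S.toList
  · simp only [if_neg h]
    exact solve_eq_of_inv 'r' 'p' (by decide) Y X S.toList
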